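-- pv_equiv track=rewrite | github.com/szmxwu/reportQC_V2 | grammer/inference/word_order_detector.py | _has_token_split
-- ===== SOURCE A (Python) =====
-- from typing import List, Dict, Optional, Tuple
--
-- def _has_token_split(token_window: List[Tuple[str, int, int]], left_chunk: str, right_chunk: str) -> bool:
--     if len(token_window) < 2:
--         return False
--
--     for split_idx in range(1, len(token_window)):
--         left = ''.join(token for token, _, _ in token_window[:split_idx])
--         right = ''.join(token for token, _, _ in token_window[split_idx:])
--         if left == left_chunk and right == right_chunk:
--             return True
--
--     return False
-- ===== SOURCE B (Python) =====
-- def _has_token_split(token_window, left_chunk, right_chunk):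
--     if len(token_window) < 2:
--         return False
--     total = ''.join(token for token, _, _ in token_window)
--     if total != left_chunk + right_chunk:
--         return False
--     prefix = ''
--     for token, _, _ in token_window[:-1]:
--         prefix += token
--         if prefix == left_chunk:
--             return True
--     return False
-- ===== Notes on version B (the rewrite author's own statement) =====
-- stated objective: faster
-- what changed: Instead of re-joining both halves for every split index, B checks once that the full concatenation equals left_chunk+right_chunk and then scans a single incrementally-built prefix for a match with left_chunk.
import Mathlib
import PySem

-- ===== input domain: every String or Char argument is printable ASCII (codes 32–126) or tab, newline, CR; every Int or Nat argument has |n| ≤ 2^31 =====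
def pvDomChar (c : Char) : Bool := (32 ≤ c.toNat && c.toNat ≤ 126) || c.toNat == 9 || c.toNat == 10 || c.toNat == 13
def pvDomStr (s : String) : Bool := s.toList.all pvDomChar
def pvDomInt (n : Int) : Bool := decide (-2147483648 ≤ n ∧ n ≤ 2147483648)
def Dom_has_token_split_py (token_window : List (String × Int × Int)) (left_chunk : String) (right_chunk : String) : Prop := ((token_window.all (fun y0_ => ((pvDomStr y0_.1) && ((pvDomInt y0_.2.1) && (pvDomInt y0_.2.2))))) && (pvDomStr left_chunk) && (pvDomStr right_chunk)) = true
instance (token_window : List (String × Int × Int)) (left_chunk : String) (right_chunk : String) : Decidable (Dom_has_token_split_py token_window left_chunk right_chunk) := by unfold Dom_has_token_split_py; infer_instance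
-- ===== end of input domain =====

-- B replaces A's per-index re-joining of both halves by one total-concatenation check plus a
-- single incremental-prefix scan (objective: faster).

-- ===== PORT A =====
-- ''.join(token for token, _, _ in xs) is ported as String.join (xs.map (·.1))
def has_token_split_py (token_window : List (String × Int × Int)) (left_chunk : String) (right_chunk : String) : Bool :=
  if token_window.length < 2 then false
  else
    (PySem.List.pyRange 1 token_window.length 1).any (fun split_idx =>
      let left := String.join ((PySem.List.slice token_window none (some split_idx)).map (·.1))
      let right := String.join ((PySem.List.slice token_window (some split_idx) none).map (·.1))
      left == left_chunk && right == right_chunk)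

-- ===== PORT B =====
-- the loop 'for token,_,_ in token_window[:-1]: prefix += token; if prefix == left_chunk: return True'
def altLoop (left_chunk : String) (pre : String) : List (String × Int × Int) → Bool
  | [] => false
  | t :: rest =>
    let p := pre ++ t.1
    if p == left_chunk then true else altLoop left_chunk p rest

def has_token_split_py_alt (token_window : List (String × Int × Int)) (left_chunk : String) (right_chunk : String) : Bool :=
  if token_window.length < 2 then false
  else
    let total := String.join (token_window.map (·.1))
    if total != left_chunk ++ right_chunk then false
    else altLoop left_chunk "" token_window.dropLast   -- token_window[:-1]

-- ===== PRECONDITION & SPEC =====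
def Spec_has_token_split_py (token_window : List (String × Int × Int)) (left_chunk : String) (right_chunk : String) (out : Bool) : Prop := out = has_token_split_py_alt token_window left_chunk right_chunk
instance (token_window : List (String × Int × Int)) (left_chunk : String) (right_chunk : String) (out : Bool) : Decidable (Spec_has_token_split_py token_window left_chunk right_chunk out) := by unfold Spec_has_token_split_py; infer_instance

-- ===== CLAIM (what is proved, stated in full; the proofs are below) =====
def Claim_equal_has_token_split_py : Prop := ∀ (token_window : List (String × Int × Int)) (left_chunk : String) (right_chunk : String), Dom_has_token_split_py token_window left_chunk right_chunk → Spec_has_token_split_py token_window left_chunk right_chunk (has_token_split_py token_window left_chunk right_chunk)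

-- ===== LEMMAS AND PROOFS =====

-- join of the token strings, the quantity both programs compare
def J (xs : List (String × Int × Int)) : String := String.join (xs.map (·.1))

theorem foldl_append_init (a : String) (l : List String) :
    l.foldl (· ++ ·) a = a ++ l.foldl (· ++ ·) "" := by
  induction l generalizing a with
  | nil => simp
  | cons h t ih => simp [List.foldl_cons, ih (a ++ h), ih h, String.append_assoc]

theorem join_app (a b : List String) : String.join (a ++ b) = String.join a ++ String.join b := by
  induction a with
  | nil => simp [String.join]
  | cons h t ih =>
    simp only [String.join, List.foldl_append, List.foldl_cons]
    rw [foldl_append_init ("" ++ h) t, foldl_append_init _ b, String.append_assoc]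

theorem J_append (xs ys : List (String × Int × Int)) : J (xs ++ ys) = J xs ++ J ys := by
  simp [J, join_app]

theorem J_cons (x : String × Int × Int) (xs : List (String × Int × Int)) :
    J (x :: xs) = x.1 ++ J xs := by
  have := J_append [x] xs
  simpa [J, String.join] using this

theorem string_left_cancel (s x y : String) (h : s ++ x = s ++ y) : x = y := by
  have := congrArg String.toList h
  simp at this
  exact String.toList_inj.mp this

-- characterisation of A's loop
theorem A_true_iff (tw : List (String × Int × Int)) (l r : String) (h2 : 2 ≤ tw.length) :
    has_token_split_py tw l r = true ↔
      ∃ k : Nat, 1 ≤ k ∧ k < tw.length ∧ J (tw.take k) = l ∧ J (tw.drop k) = r := by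
  rw [has_token_split_py, if_neg (by omega)]
  rw [List.any_eq_true]
  constructor
  · rintro ⟨i, hmem, hcond⟩
    rw [PySem.List.mem_pyRange_one] at hmem
    obtain ⟨h1i, h2i⟩ := hmem
    refine ⟨i.toNat, by omega, by omega, ?_⟩
    dsimp only at hcond
    rw [PySem.List.slice_to tw (by omega), PySem.List.slice_from tw (by omega)] at hcond
    simp only [Bool.and_eq_true, beq_iff_eq] at hcond
    exact ⟨hcond.1, hcond.2⟩
  · rintro ⟨k, hk1, hk2, hL, hR⟩
    refine ⟨(k : Int), ?_, ?_⟩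
    · rw [PySem.List.mem_pyRange_one]; omega
    · dsimp only
      rw [PySem.List.slice_to tw (by omega), PySem.List.slice_from tw (by omega)]
      simp only [Bool.and_eq_true, beq_iff_eq, Int.toNat_natCast]
      exact ⟨hL, hR⟩

-- characterisation of B's loop
theorem altLoop_true_iff (l pre : String) (xs : List (String × Int × Int)) :
    altLoop l pre xs = true ↔ ∃ k : Nat, 1 ≤ k ∧ k ≤ xs.length ∧ pre ++ J (xs.take k) = l := by
  induction xs generalizing pre with
  | nil => simp [altLoop]
  | cons t rest ih =>
    rw [altLoop]
    by_cases hp : pre ++ t.1 = l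
    · rw [if_pos (by simpa using hp)]
      constructor
      · intro _
        exact ⟨1, le_refl 1, by simp, by simpa [J, String.join, String.append_assoc] using hp⟩
      · intro _; rfl
    · rw [if_neg (by simpa using hp), ih]
      constructor
      · rintro ⟨j, hj1, hj2, hJ⟩
        refine ⟨j + 1, by omega, by simpa using (by omega : j + 1 ≤ rest.length + 1), ?_⟩
        rw [List.take_succ_cons, J_cons, ← String.append_assoc]
        exact hJ
      · rintro ⟨k, hk1, hk2, hJ⟩
        match k, hk1 with
        | 1, _ =>
          exfalso; apply hp
          simpa [J, String.join] using hJ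
        | (j+2), _ =>
          refine ⟨j + 1, by omega, by simpa using (by simpa using hk2 : j + 2 ≤ rest.length + 1), ?_⟩
          rw [List.take_succ_cons, J_cons, ← String.append_assoc] at hJ
          exact hJ

-- characterisation of B
theorem B_true_iff (tw : List (String × Int × Int)) (l r : String) (h2 : 2 ≤ tw.length) :
    has_token_split_py_alt tw l r = true ↔
      (J tw = l ++ r ∧ ∃ k : Nat, 1 ≤ k ∧ k ≤ tw.length - 1 ∧ J (tw.take k) = l) := by
  rw [has_token_split_py_alt, if_neg (by omega)]
  dsimp only
  by_cases htot : String.join (tw.map (·.1)) = l ++ r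
  · have : (String.join (tw.map (·.1)) != l ++ r) = false := by simpa using htot
    rw [this, if_neg (by simp)]
    rw [altLoop_true_iff]
    constructor
    · rintro ⟨k, hk1, hk2, hJ⟩
      refine ⟨htot, k, hk1, by simpa [List.length_dropLast] using hk2, ?_⟩
      rw [List.dropLast_eq_take, List.take_take] at hJ
      rw [min_eq_left (by simpa [List.length_dropLast] using hk2)] at hJ
      simpa using hJ
    · rintro ⟨_, k, hk1, hk2, hJ⟩
      refine ⟨k, hk1, by simpa [List.length_dropLast] using hk2, ?_⟩
      rw [List.dropLast_eq_take, List.take_take, min_eq_left (by omega)]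
      simpa using hJ
  · have : (String.join (tw.map (·.1)) != l ++ r) = true := by simpa using htot
    rw [this, if_pos rfl]
    constructor
    · intro h; cases h
    · rintro ⟨h, -⟩; exact absurd h htot

-- ===== VERDICT (by name: the statement is the Claim_ definition above) =====
theorem has_token_split_py_spec : Claim_equal_has_token_split_py := by
  intro tw l r _
  unfold Spec_has_token_split_py
  by_cases h2 : 2 ≤ tw.length
  · rw [Bool.eq_iff_iff, A_true_iff tw l r h2, B_true_iff tw l r h2]
    constructor
    · rintro ⟨k, hk1, hk2, hL, hR⟩
      refine ⟨?_, k, hk1, by omega, hL⟩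
      calc J tw = J (tw.take k ++ tw.drop k) := by rw [List.take_append_drop]
        _ = J (tw.take k) ++ J (tw.drop k) := J_append _ _
        _ = l ++ r := by rw [hL, hR]
    · rintro ⟨htot, k, hk1, hk2, hL⟩
      refine ⟨k, hk1, by omega, hL, ?_⟩
      apply string_left_cancel l
      calc l ++ J (tw.drop k) = J (tw.take k) ++ J (tw.drop k) := by rw [hL]
        _ = J (tw.take k ++ tw.drop k) := (J_append _ _).symm
        _ = J tw := by rw [List.take_append_drop]
        _ = l ++ r := htot
  · rw [has_token_split_py, if_pos (by omega), has_token_split_py_alt, if_pos (by omega)]
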